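-- pv_equiv track=rewrite | github.com/logan-lampton/neetcode | leetcode/2119_A_Number_After_a_Double_Reversal.py | isSameAfterReversals
-- ===== SOURCE A (Python) =====
-- def isSameAfterReversals(num: int) -> bool:
--     string_num = str(num)
--     reversed1 = ""
--     for i in range(len(string_num) - 1, -1, -1):
--         if reversed1 == "" and string_num[i] == "0":
--             continue
--         else:
--             reversed1 += string_num[i]
--     if reversed1 == "":
--         reversed1 = "0"
--
--     reversed2 = ""
--     for i in range(len(reversed1) - 1, -1, -1):
--         reversed2 += reversed1[i]
--
--     return str(num) == reversed2
-- ===== SOURCE B (Python) =====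
-- def isSameAfterReversals(num: int) -> bool:
--     return num == 0 or num % 10 != 0
-- ===== Notes on version B (the rewrite author's own statement) =====
-- stated objective: simpler
-- what changed: Replaces the two string-reversal loops over str(num) with the closed-form arithmetic test: the number survives a double digit-reversal exactly when it is zero or its last digit (num mod ten) is nonzero.
import Mathlib
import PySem

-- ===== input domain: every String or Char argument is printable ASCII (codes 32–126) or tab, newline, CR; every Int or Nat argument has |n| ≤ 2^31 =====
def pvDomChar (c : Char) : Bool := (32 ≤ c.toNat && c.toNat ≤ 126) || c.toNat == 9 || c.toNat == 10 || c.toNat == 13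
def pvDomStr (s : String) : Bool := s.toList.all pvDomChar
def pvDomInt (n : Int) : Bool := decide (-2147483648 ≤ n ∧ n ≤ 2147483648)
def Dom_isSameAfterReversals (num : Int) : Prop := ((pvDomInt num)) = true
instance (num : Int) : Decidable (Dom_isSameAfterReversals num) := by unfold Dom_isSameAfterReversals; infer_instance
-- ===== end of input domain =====

-- B replaces A's two digit-reversal loops by the closed-form test num == 0 or num % 10 != 0 (simpler; return value only, no side effects involved).

-- ===== PORT A =====
-- A works on str(num); we port strings as their character lists (PySem.Int.toChars),
-- string indexing s[i] as PySem.List.pyGetD (every index produced by the ranges is in range).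
def isSameAfterReversals (num : Int) : Bool :=
  let stringNum := PySem.Int.toChars num
  let r1 := (PySem.List.pyRange ((stringNum.length : Int) - 1) (-1) (-1)).foldl
    (fun reversed1 i =>
      if reversed1 = [] ∧ PySem.List.pyGetD stringNum i ' ' = '0' then reversed1
      else reversed1 ++ [PySem.List.pyGetD stringNum i ' '])
    ([] : List Char)
  let reversed1 := if r1 = [] then ['0'] else r1
  let reversed2 := (PySem.List.pyRange ((reversed1.length : Int) - 1) (-1) (-1)).foldl
    (fun reversed2 i => reversed2 ++ [PySem.List.pyGetD reversed1 i ' '])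
    ([] : List Char)
  stringNum == reversed2

-- ===== PORT B =====
def isSameAfterReversals_alt (num : Int) : Bool :=
  num == 0 || PySem.Int.mod num 10 != 0

-- ===== PRECONDITION & SPEC =====
def Spec_isSameAfterReversals (num : Int) (out : Bool) : Prop := out = isSameAfterReversals_alt num
instance (num : Int) (out : Bool) : Decidable (Spec_isSameAfterReversals num out) := by unfold Spec_isSameAfterReversals; infer_instance

-- ===== CLAIM (what is proved, stated in full; the proofs are below) =====
def Claim_equal_isSameAfterReversals : Prop := ∀ (num : Int), Dom_isSameAfterReversals num → Spec_isSameAfterReversals num (isSameAfterReversals num)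

-- ===== LEMMAS AND PROOFS =====

-- descending index loop 'for i in range(len(l)-1, -1, -1): acc = g acc l[i]' folds over l.reverse
theorem pv_foldl_desc {β : Type} (g : β → Char → β) :
    ∀ (l : List Char) (a : β),
      (PySem.List.pyRange ((l.length : Int) - 1) (-1) (-1)).foldl
        (fun r i => g r (PySem.List.pyGetD l i ' ')) a
      = l.reverse.foldl g a := by
  intro l
  induction l using List.reverseRecOn with
  | nil =>
    intro a
    rw [PySem.List.pyRange_neg_one_eq_nil (by simp)]
    simp
  | append_singleton ys y ih =>
    intro a
    have hlen : ((ys ++ [y]).length : Int) - 1 = (ys.length : Int) := by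
      simp
    rw [hlen, PySem.List.pyRange_neg_one_cons (by omega)]
    simp only [List.foldl_cons]
    have hy : PySem.List.pyGetD (ys ++ [y]) (ys.length : Int) ' ' = y := by
      rw [PySem.List.pyGetD_eq_getElem _ _ (by omega) (by simp)]
      simp
    rw [hy]
    have hcongr : List.foldl
        (fun r i => g r (PySem.List.pyGetD (ys ++ [y]) i ' ')) (g a y)
        (PySem.List.pyRange ((ys.length : Int) - 1) (-1) (-1))
        = List.foldl (fun r i => g r (PySem.List.pyGetD ys i ' ')) (g a y)
        (PySem.List.pyRange ((ys.length : Int) - 1) (-1) (-1)) := by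
      apply PySem.List.foldl_congr_mem
      intro acc x hx
      have hx' := (PySem.List.mem_pyRange_neg_one).1 hx
      have h0 : (0 : Int) ≤ x := by omega
      have h1 : x < (ys.length : Int) := by omega
      rw [PySem.List.pyGetD_eq_getElem _ _ h0 (by simp; omega),
          PySem.List.pyGetD_eq_getElem _ _ h0 (by omega)]
      rw [List.getElem_append_left (by omega)]
    rw [hcongr, ih]
    simp

-- the plain append loop
theorem pv_foldl_app : ∀ (xs a : List Char),
    xs.foldl (fun r c => r ++ [c]) a = a ++ xs := by
  intro xs
  induction xs with
  | nil => simp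
  | cons c xs ih => intro a; simp [ih]

-- the skip-while-empty loop, nonempty accumulator: appends everything
theorem pv_foldl_skip_ne : ∀ (xs acc : List Char), acc ≠ [] →
    xs.foldl (fun r c => if r = [] ∧ c = '0' then r else r ++ [c]) acc = acc ++ xs := by
  intro xs
  induction xs with
  | nil => simp
  | cons c xs ih =>
    intro acc h
    simp only [List.foldl_cons, h, false_and, if_false]
    rw [ih _ (by simp)]
    simp

-- the skip-while-empty loop from the empty accumulator: drops leading '0's
theorem pv_foldl_skip : ∀ (xs : List Char),
    xs.foldl (fun r c => if r = [] ∧ c = '0' then r else r ++ [c]) ([] : List Char)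
    = xs.dropWhile (fun c => c == '0') := by
  intro xs
  induction xs with
  | nil => simp
  | cons c xs ih =>
    by_cases hc : c = '0'
    · subst hc
      simp only [List.foldl_cons, List.dropWhile_cons]
      simpa using ih
    · simp only [List.foldl_cons, hc, and_false, if_false, List.nil_append,
        List.dropWhile_cons]
      rw [pv_foldl_skip_ne xs [c] (by simp)]
      simp [hc]

-- A's value, rewritten: l == reverse of (l.reverse with leading '0's dropped, or "0")
theorem pv_A_eq (num : Int) :
    isSameAfterReversals num =
      (let l := PySem.Int.toChars num
       let d := l.reverse.dropWhile (fun c => c == '0')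
       l == (if d = [] then ['0'] else d).reverse) := by
  unfold isSameAfterReversals
  have h1 := pv_foldl_desc (fun r c => if r = [] ∧ c = '0' then r else r ++ [c])
      (PySem.Int.toChars num) ([] : List Char)
  have h2 : ∀ (l : List Char),
      (PySem.List.pyRange ((l.length : Int) - 1) (-1) (-1)).foldl
        (fun r i => r ++ [PySem.List.pyGetD l i ' ']) ([] : List Char) = l.reverse := by
    intro l
    have := pv_foldl_desc (fun r c => r ++ [c]) l ([] : List Char)
    rw [this, pv_foldl_app]
    simp
  simp only []
  rw [h1, pv_foldl_skip, h2]

-- Nat.toDigitsCore pushes the accumulator to the right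
theorem pv_core_append : ∀ (fuel n : Nat) (ds : List Char),
    Nat.toDigitsCore 10 fuel n ds = Nat.toDigitsCore 10 fuel n [] ++ ds := by
  intro fuel
  induction fuel with
  | zero => intro n ds; simp [Nat.toDigitsCore]
  | succ fuel ih =>
    intro n ds
    simp only [Nat.toDigitsCore]
    by_cases h : n / 10 = 0
    · simp [h]
    · simp only [h, if_false]
      rw [ih (n / 10) (Nat.digitChar (n % 10) :: ds),
          ih (n / 10) [Nat.digitChar (n % 10)]]
      simp

-- the last character of str(n) (n : Nat) is the digit char of n % 10
theorem pv_toDigits_last (n : Nat) :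
    (Nat.toDigits 10 n).getLast? = some (Nat.digitChar (n % 10)) := by
  unfold Nat.toDigits
  simp only [Nat.toDigitsCore]
  by_cases h : n / 10 = 0
  · simp [h]
  · simp only [h, if_false]
    rw [pv_core_append]
    simp

theorem pv_toDigits_ne_nil (n : Nat) : Nat.toDigits 10 n ≠ [] := by
  intro h
  have := pv_toDigits_last n
  rw [h] at this
  simp at this

-- a positive number's digit string contains a nonzero digit
theorem pv_toDigitsCore_exists : ∀ (fuel n : Nat), 0 < n → n < fuel →
    ∃ c ∈ Nat.toDigitsCore 10 fuel n [], c ≠ '0' := by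
  intro fuel
  induction fuel with
  | zero => intro n h1 h2; omega
  | succ fuel ih =>
    intro n h1 h2
    simp only [Nat.toDigitsCore]
    by_cases h : n / 10 = 0
    · simp only [h]
      refine ⟨Nat.digitChar (n % 10), by simp, ?_⟩
      have hn : n < 10 := by omega
      have : n % 10 = n := Nat.mod_eq_of_lt hn
      rw [this]
      interval_cases n <;> decide
    · simp only [h, if_false]
      rw [pv_core_append]
      obtain ⟨c, hc, hc0⟩ := ih (n / 10) (by omega) (by omega)
      exact ⟨c, by simp [hc], hc0⟩

theorem pv_digitChar_ne (m : Nat) (h : m < 10) (h0 : m ≠ 0) : Nat.digitChar m ≠ '0' := by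
  interval_cases m <;> simp_all <;> decide

-- Python's % with positive divisor agrees with emod
theorem pv_mod10 (num : Int) : PySem.Int.mod num 10 = num % 10 := by
  unfold PySem.Int.mod
  rw [Int.fmod_eq_emod]
  simp

theorem pv_main (num : Int) : isSameAfterReversals num = isSameAfterReversals_alt num := by
  by_cases h0 : num = 0
  · subst h0; decide
  · rw [pv_A_eq]
    simp only []
    unfold isSameAfterReversals_alt
    have hB : (num == 0 || PySem.Int.mod num 10 != 0)
        = !(decide (num.natAbs % 10 = 0)) := by
      rw [pv_mod10]
      by_cases hm : num.natAbs % 10 = 0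
      · have h1 : num % 10 = 0 := by omega
        simp [h0, h1, hm]
      · have h1 : num % 10 ≠ 0 := by omega
        simp [h0, h1, hm]
    rw [hB]
    set l := PySem.Int.toChars num with hl
    have hn : 0 < num.natAbs := by omega
    -- last character of l
    have hlast : l.getLast? = some (Nat.digitChar (num.natAbs % 10)) := by
      rw [hl]
      unfold PySem.Int.toChars
      by_cases hneg : num < 0
      · simp only [hneg, ite_true]
        cases hD : Nat.toDigits 10 num.natAbs with
        | nil => exact absurd hD (pv_toDigits_ne_nil _)
        | cons b tl =>
          rw [List.getLast?_cons_cons, ← hD]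
          exact pv_toDigits_last _
      · simp only [hneg, if_false]
        have : num.toNat = num.natAbs := by omega
        rw [this]
        exact pv_toDigits_last _
    -- l contains a character that is not '0'
    have hex : ∃ c ∈ l, c ≠ '0' := by
      rw [hl]
      unfold PySem.Int.toChars
      by_cases hneg : num < 0
      · simp only [hneg, ite_true]
        exact ⟨'-', by simp, by decide⟩
      · simp only [hneg, if_false]
        have hnum : num.toNat = num.natAbs := by omega
        rw [hnum]
        unfold Nat.toDigits
        exact pv_toDigitsCore_exists _ _ hn (by omega)
    have hlne : l ≠ [] := by
      intro h; rw [h] at hlast; simp at hlast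
    -- l.reverse = lastchar :: rest
    have hrev : ∃ t, l.reverse = Nat.digitChar (num.natAbs % 10) :: t := by
      have : l.reverse.head? = some (Nat.digitChar (num.natAbs % 10)) := by
        rw [List.head?_reverse]; exact hlast
      cases hc : l.reverse with
      | nil => rw [hc] at this; simp at this
      | cons x t => rw [hc] at this; simp at this; exact ⟨t, by rw [this]⟩
    obtain ⟨t, ht⟩ := hrev
    by_cases hm : num.natAbs % 10 = 0
    · -- trailing zero: A is false, B is false
      simp only [hm, decide_true, Bool.not_true]
      have hdc : Nat.digitChar (num.natAbs % 10) = '0' := by rw [hm]; decide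
      rw [hdc] at ht
      have hdrop : l.reverse.dropWhile (fun c => c == '0')
          = t.dropWhile (fun c => c == '0') := by
        rw [ht, List.dropWhile_cons]; simp
      set d := t.dropWhile (fun c => c == '0') with hd
      rw [hdrop]
      have hdlen : d.length ≤ t.length := by
        rw [hd]; exact List.length_dropWhile_le _ _
      have htlen : t.length + 1 = l.length := by
        have := congrArg List.length ht
        simp at this; omega
      by_cases hdn : d = []
      · -- all characters of l are '0': impossible since hex
        exfalso
        obtain ⟨c, hcl, hc0⟩ := hex
        have hct : c ∈ l.reverse := by simp [hcl]
        rw [ht] at hct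
        rcases List.mem_cons.1 hct with h | h
        · exact hc0 h
        · have := List.dropWhile_eq_nil_iff.1 hdn c h
          simp at this
          exact hc0 this
      · simp only [hdn, if_false]
        -- lengths differ, so the equality test is false
        have : l ≠ d.reverse := by
          intro heq
          have := congrArg List.length heq
          simp at this
          omega
        simp [this]
    · -- no trailing zero: A is true, B is true
      simp only [hm, decide_false, Bool.not_false]
      have hdc : Nat.digitChar (num.natAbs % 10) ≠ '0' :=
        pv_digitChar_ne _ (Nat.mod_lt _ (by omega)) hm
      have hdrop : l.reverse.dropWhile (fun c => c == '0') = l.reverse := by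
        rw [ht, List.dropWhile_cons]
        simp [hdc]
      rw [hdrop]
      have hrn : l.reverse ≠ [] := by simp [hlne]
      simp [hrn]

-- ===== VERDICT (by name: the statement is the Claim_ definition above) =====
theorem isSameAfterReversals_spec : Claim_equal_isSameAfterReversals := by
  intro num _
  unfold Spec_isSameAfterReversals
  exact pv_main num
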